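-- pv_equiv track=rewrite | github.com/JuantonioMS/biohub_base | biohub_backup/ucaib_procariotic_simple_assembly.py | check
-- ===== SOURCE A (Python) =====
-- def check(parent, sons):
--
--     for index in range(len(parent)):
--         candidates = []
--         for son in sons:
--             if son[:index] == parent[:index]:
--                 pass
--             else:
--                 candidates.append(son)
--
--         if candidates:
--             for candidate in candidates:
--                 sons.remove(candidate)
--
--             candidates = []
--
--         if len(sons) == 1:
--             break
--
--     return sons
-- ===== SOURCE B (Python) =====
-- # B: compute each son's longest-common-prefix length with parent once, find the
-- # break threshold with a frequency dict and a running suffix count, filter once.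
-- # Note: A mutates `sons` in place (remove); B leaves it untouched — the
-- # equivalence proved is about the return value.
-- def check(parent, sons):
--     plen = len(parent)
--     if plen == 0:
--         return sons
--     lcps = []
--     for son in sons:
--         n = 0
--         for x, y in zip(parent, son):
--             if x != y:
--                 break
--             n += 1
--         lcps.append(n)
--     freq = {}
--     for l in lcps:
--         freq[l] = freq.get(l, 0) + 1
--     c = len(sons)  # c = number of sons whose lcp >= i, maintained incrementally
--     t = plen - 1
--     for i in range(plen):
--         if c == 1:
--             t = i
--             break
--         c -= freq.get(i, 0)
--     return [son for son, l in zip(sons, lcps) if l >= t]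
-- ===== Notes on version B (the rewrite author's own statement) =====
-- stated objective: faster
-- what changed: instead of re-slicing and re-comparing every son's prefix at every index and mutating the list by repeated remove(), B computes each son's lcp length with the parent once, scans indices counting survivors to find the break threshold, and filters once
import Mathlib
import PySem

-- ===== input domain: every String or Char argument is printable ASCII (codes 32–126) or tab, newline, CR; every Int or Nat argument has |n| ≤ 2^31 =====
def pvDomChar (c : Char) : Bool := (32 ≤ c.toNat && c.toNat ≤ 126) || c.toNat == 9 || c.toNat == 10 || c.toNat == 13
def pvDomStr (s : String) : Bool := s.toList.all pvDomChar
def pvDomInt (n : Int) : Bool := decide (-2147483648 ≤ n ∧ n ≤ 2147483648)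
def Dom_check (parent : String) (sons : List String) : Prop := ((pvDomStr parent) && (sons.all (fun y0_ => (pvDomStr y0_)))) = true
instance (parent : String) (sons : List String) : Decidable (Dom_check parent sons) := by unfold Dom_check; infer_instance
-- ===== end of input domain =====

-- B computes each son's lcp length with the parent once and finds the break threshold with a
-- frequency dict and a running suffix count, instead of A's per-index re-slicing and repeated
-- remove(); A mutates `sons` in place (remove), B does not — the equivalence proved is about
-- the return value.

-- ===== PORT A =====
-- the outer `for index in range(len(parent))` with its `break`
def checkLoop (ps : List Char) : List Int → List String → List String
  | [], sons => sons
  | i :: rest, sons =>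
    -- candidates = []; for son in sons: if son[:index] == parent[:index]: pass else: candidates.append(son)
    let candidates := sons.foldl (fun acc son =>
      if PySem.List.slice son.toList none (some i) = PySem.List.slice ps none (some i)
      then acc else acc ++ [son]) []
    -- if candidates: for candidate in candidates: sons.remove(candidate)
    -- (remove? never fails here: every candidate occurrence is still present; getD is the unreachable default)
    let sons' := if candidates = [] then sons
      else candidates.foldl (fun s c => (PySem.List.remove? s c).getD s) sons
    -- if len(sons) == 1: break
    if sons'.length = 1 then sons' else checkLoop ps rest sons'

def check (parent : String) (sons : List String) : List String :=
  checkLoop parent.toList (PySem.List.pyRange 0 (PySem.Str.len parent) 1) sons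

-- ===== PORT B =====
-- n = 0; for x, y in zip(parent, son): if x != y: break; n += 1
def lcpLoop : List (Char × Char) → Int → Int
  | [], n => n
  | (x, y) :: rest, n => if x ≠ y then n else lcpLoop rest (n + 1)

-- for i in range(plen): if c == 1: t = i; break; c -= freq.get(i, 0)
def tLoop (freq : PySem.Dict Int Int) (plen : Int) : List Int → Int → Int
  | [], _ => plen - 1
  | i :: rest, c => if c = 1 then i else tLoop freq plen rest (c - freq.getD i 0)

def check_alt (parent : String) (sons : List String) : List String :=
  let plen := PySem.Str.len parent
  if plen = 0 then sons
  else
    let lcps := sons.foldl (fun acc son => acc ++ [lcpLoop (parent.toList.zip son.toList) 0]) []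
    -- freq = {}; for l in lcps: freq[l] = freq.get(l, 0) + 1
    let freq := lcps.foldl (fun d l => d.insert l (d.getD l 0 + 1)) PySem.Dict.empty
    let t := tLoop freq plen (PySem.List.pyRange 0 plen 1) (sons.length : Int)
    ((sons.zip lcps).filter (fun p => decide (t ≤ p.2))).map Prod.fst

-- ===== PRECONDITION & SPEC =====
def Spec_check (parent : String) (sons : List String) (out : List String) : Prop := out = check_alt parent sons
instance (parent : String) (sons : List String) (out : List String) : Decidable (Spec_check parent sons out) := by unfold Spec_check; infer_instance

-- ===== CLAIM (what is proved, stated in full; the proofs are below) =====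
def Claim_equal_check : Prop := ∀ (parent : String) (sons : List String), Dom_check parent sons → Spec_check parent sons (check parent sons)

-- ===== LEMMAS AND PROOFS =====

-- length of the longest common prefix (spec-level, Nat)
def lcpN : List Char → List Char → Nat
  | x :: xs, y :: ys => if x = y then lcpN xs ys + 1 else 0
  | _, _ => 0

-- Bool predicate: son survives the filter at index i
def matchGe (ps : List Char) (i : Nat) (son : String) : Bool := decide (i ≤ lcpN ps son.toList)

-- number of survivors at index i
def cntF (ps : List Char) (sons0 : List String) (i : Nat) : Nat :=
  (sons0.filter (matchGe ps i)).length

-- shared model of both loops' break search: first i ∈ ks with cnt i = 1, else fallthrough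
def tF (cnt : Nat → Nat) : List Nat → Nat → Nat
  | [], m => m
  | i :: rest, _ => if cnt i = 1 then i else tF cnt rest i

lemma lcpLoop_eq (a b : List Char) : ∀ n : Int, lcpLoop (a.zip b) n = n + (lcpN a b : Int) := by
  induction a generalizing b with
  | nil => intro n; simp [lcpLoop, lcpN]
  | cons x xs ih =>
    intro n
    cases b with
    | nil => simp [lcpLoop, lcpN]
    | cons y ys =>
      by_cases h : x = y
      · simp [lcpLoop, lcpN, h, ih ys]; ring
      · simp [lcpLoop, lcpN, h]

lemma take_eq_iff_lcp (a b : List Char) : ∀ n : Nat, n ≤ a.length →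
    ((b.take n = a.take n) ↔ n ≤ lcpN a b) := by
  induction a generalizing b with
  | nil => intro n h; simp at h; simp [h]
  | cons x xs ih =>
    intro n h
    cases n with
    | zero => simp
    | succ m =>
      cases b with
      | nil =>
        simp only [List.take_nil, List.take_succ_cons, lcpN]
        constructor
        · intro he; exact absurd he.symm (List.cons_ne_nil _ _)
        · intro hle; omega
      | cons y ys =>
        simp only [List.take_succ_cons, List.cons_eq_cons]
        by_cases hxy : x = y
        · subst hxy
          have hm : m ≤ xs.length := by simpa using h
          simp [lcpN, ih ys m hm]
        · constructor
          · rintro ⟨h1, -⟩; exact absurd h1.symm hxy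
          · intro hle; simp [lcpN, hxy] at hle

-- the candidates-building fold is a filter of the mismatching sons
lemma candidates_eq (ps : List Char) (i : Int) (sons : List String) :
    sons.foldl (fun acc son =>
      if PySem.List.slice son.toList none (some i) = PySem.List.slice ps none (some i)
      then acc else acc ++ [son]) []
    = sons.filter (fun son => !(PySem.List.slice son.toList none (some i) = PySem.List.slice ps none (some i) : Bool)) := by
  have h := PySem.List.foldl_append_ite_eq_filter
    (p := fun son : String => ¬ (PySem.List.slice son.toList none (some i) = PySem.List.slice ps none (some i)))
    (l := sons) (acc := [])
  simp only [ite_not] at h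
  simpa using h

lemma rm_cons_ne (x c : String) (xs : List String) (h : c ≠ x) :
    (PySem.List.remove? (x :: xs) c).getD (x :: xs) = x :: (PySem.List.remove? xs c).getD xs := by
  rw [PySem.List.remove?_cons_of_ne xs (fun he => h he.symm)]
  cases hr : PySem.List.remove? xs c <;> simp

lemma rm_fold_cons (x : String) (p : String → Bool) (hx : p x = true) :
    ∀ (cs : List String), (∀ c ∈ cs, p c = false) → ∀ (xs : List String),
    cs.foldl (fun s c => (PySem.List.remove? s c).getD s) (x :: xs)
    = x :: cs.foldl (fun s c => (PySem.List.remove? s c).getD s) xs := by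
  intro cs
  induction cs with
  | nil => intro _ xs; rfl
  | cons c cs ih =>
    intro hall xs
    have hc : c ≠ x := fun he => by rw [he] at hall; simp [hx] at hall
    simp only [List.foldl_cons, rm_cons_ne x c xs hc]
    exact ih (fun d hd => hall d (List.mem_cons_of_mem _ hd)) _

-- removing, in order, exactly the mismatching elements leaves the matching ones
lemma remove_fold (p : String → Bool) (s : List String) :
    (s.filter (fun x => !p x)).foldl (fun s c => (PySem.List.remove? s c).getD s) s
    = s.filter p := by
  induction s with
  | nil => rfl
  | cons x xs ih =>
    by_cases hx : p x
    · rw [List.filter_cons_of_neg (by simp [hx]), List.filter_cons_of_pos hx]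
      rw [rm_fold_cons x p hx _ (fun c hc => by simpa using (List.of_mem_filter hc)) xs]
      rw [ih]
    · have hx' : p x = false := by simpa using hx
      rw [List.filter_cons_of_pos (by simp [hx']), List.filter_cons_of_neg (by simp [hx'])]
      simp only [List.foldl_cons, PySem.List.remove?_cons_self, Option.getD_some]
      exact ih

-- one iteration of A's body turns the current list into its filter at index j
lemma step_eq (ps : List Char) (sons0 : List String) (j m : Nat) (hm : m ≤ j) (hj : j ≤ ps.length) :
    (if ((sons0.filter (matchGe ps m)).foldl (fun acc son =>
        if PySem.List.slice son.toList none (some (Int.ofNat j)) = PySem.List.slice ps none (some (Int.ofNat j))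
        then acc else acc ++ [son]) []) = []
     then sons0.filter (matchGe ps m)
     else ((sons0.filter (matchGe ps m)).foldl (fun acc son =>
        if PySem.List.slice son.toList none (some (Int.ofNat j)) = PySem.List.slice ps none (some (Int.ofNat j))
        then acc else acc ++ [son]) []).foldl (fun s c => (PySem.List.remove? s c).getD s) (sons0.filter (matchGe ps m)))
    = sons0.filter (matchGe ps j) := by
  set s := sons0.filter (matchGe ps m) with hs
  set p : String → Bool := fun son =>
    (PySem.List.slice son.toList none (some (Int.ofNat j)) = PySem.List.slice ps none (some (Int.ofNat j)) : Bool) with hp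
  have hpm : ∀ son : String, p son = matchGe ps j son := by
    intro son
    have hsl : ∀ xs : List Char, PySem.List.slice xs none (some (Int.ofNat j)) = xs.take j := by
      intro xs
      rw [PySem.List.slice_to xs (b := Int.ofNat j) (by exact Int.natCast_nonneg j)]
      simp
    simp only [hp, hsl, matchGe]
    rw [Bool.eq_iff_iff]
    simp [take_eq_iff_lcp ps son.toList j hj]
  have hfil : s.filter p = sons0.filter (matchGe ps j) := by
    rw [List.filter_congr (fun son _ => hpm son), hs, List.filter_filter]
    apply List.filter_congr
    intro son _
    simp only [matchGe]
    by_cases h : j ≤ lcpN ps son.toList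
    · simp [h, le_trans hm h]
    · simp [h]
  have hcand := candidates_eq ps (Int.ofNat j) s
  rw [show (fun son : String => !(PySem.List.slice son.toList none (some (Int.ofNat j)) = PySem.List.slice ps none (some (Int.ofNat j)) : Bool)) = (fun son => !p son) from rfl] at hcand
  rw [hcand]
  by_cases hc : s.filter (fun son => !p son) = []
  · rw [if_pos hc, ← hfil]
    symm
    rw [List.filter_eq_self]
    intro a ha
    have := List.filter_eq_nil_iff.mp hc a ha
    simpa using this
  · rw [if_neg hc, remove_fold p s, hfil]

-- A's loop on the indices [j, j+n) from a state already filtered at level m ≤ j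
lemma checkLoop_eq (ps : List Char) (sons0 : List String) :
    ∀ (n j m : Nat), j + n = ps.length → m ≤ j →
    checkLoop ps ((List.range' j n).map Int.ofNat) (sons0.filter (matchGe ps m))
    = sons0.filter (matchGe ps (tF (cntF ps sons0) (List.range' j n) m)) := by
  intro n
  induction n with
  | zero => intro j m _ _; simp [checkLoop, tF]
  | succ n ih =>
    intro j m hjn hm
    rw [List.range'_succ, List.map_cons]
    simp only [checkLoop]
    rw [step_eq ps sons0 j m hm (by omega)]
    by_cases h1 : (sons0.filter (matchGe ps j)).length = 1
    · rw [if_pos h1, tF, if_pos (show cntF ps sons0 j = 1 from h1)]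
    · rw [if_neg h1, tF, if_neg (show ¬ cntF ps sons0 j = 1 from h1)]
      exact ih (j+1) j (by omega) (by omega)

-- counts at consecutive thresholds differ by the number of lcps equal to the lower one
lemma cnt_split (ps : List Char) (sons0 : List String) (j : Nat) :
    cntF ps sons0 j = cntF ps sons0 (j+1) + sons0.countP (fun s => lcpN ps s.toList == j) := by
  rw [cntF, cntF, ← List.countP_eq_length_filter, ← List.countP_eq_length_filter]
  induction sons0 with
  | nil => rfl
  | cons x xs ih =>
    simp only [List.countP_cons, matchGe] at *
    by_cases h1 : j ≤ lcpN ps x.toList <;> by_cases h2 : j + 1 ≤ lcpN ps x.toList <;>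
      by_cases h3 : lcpN ps x.toList = j <;> simp [h1, h2, h3] <;> omega

-- the frequency dict built by B counts each lcp value
lemma freq_getD (lcps : List Int) (v : Int) :
    (lcps.foldl (fun d l => d.insert l (d.getD l 0 + 1)) PySem.Dict.empty).getD v 0
    = (lcps.count v : Int) := by
  rw [PySem.Dict.getD_foldl_insert_add_one]
  simp

-- B's break search agrees with the same model
lemma tLoop_eq (ps : List Char) (sons0 : List String) (hP : 0 < ps.length) :
    ∀ (n j m : Nat), j + n = ps.length → (n = 0 → m = ps.length - 1) →
    tLoop ((sons0.map (fun son => (lcpN ps son.toList : Int))).foldl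
        (fun d l => d.insert l (d.getD l 0 + 1)) PySem.Dict.empty)
      (ps.length : Int) ((List.range' j n).map Int.ofNat) (cntF ps sons0 j : Int)
    = Int.ofNat (tF (cntF ps sons0) (List.range' j n) m) := by
  intro n
  induction n with
  | zero =>
    intro j m hj hm
    simp only [List.range'_zero, List.map_nil, tLoop, tF]
    rw [hm rfl]
    simp only [Int.ofNat_eq_natCast]
    omega
  | succ n ih =>
    intro j m hjn hm
    rw [List.range'_succ, List.map_cons]
    simp only [tLoop, tF, Int.ofNat_eq_natCast]
    have hstep : (cntF ps sons0 j : Int) -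
        ((sons0.map (fun son => (lcpN ps son.toList : Int))).foldl
          (fun d l => d.insert l (d.getD l 0 + 1)) PySem.Dict.empty).getD ((j : Nat) : Int) 0
        = (cntF ps sons0 (j+1) : Int) := by
      rw [freq_getD]
      have hc : (sons0.map (fun son => (lcpN ps son.toList : Int))).count ((j : Nat) : Int)
          = sons0.countP (fun s => lcpN ps s.toList == j) := by
        rw [List.count_eq_countP, List.countP_map]
        apply List.countP_congr
        intro s _
        simp only [Function.comp, beq_iff_eq]
        constructor
        · intro h; exact_mod_cast h
        · intro h; exact_mod_cast h
      rw [hc]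
      have := cnt_split ps sons0 j
      omega
    by_cases h1 : cntF ps sons0 j = 1
    · rw [if_pos (by exact_mod_cast h1), if_pos h1]
    · rw [if_neg (by exact_mod_cast h1), if_neg h1, hstep]
      exact ih (j+1) j (by omega) (by omega)

-- B's lcps-building fold is a map
lemma lcps_fold_eq (ps : List Char) (sons : List String) :
    sons.foldl (fun acc son => acc ++ [lcpLoop (ps.zip son.toList) 0]) []
    = sons.map (fun son => (lcpN ps son.toList : Int)) := by
  have h := PySem.List.foldl_append_singleton_eq_map
    (f := fun son : String => lcpLoop (ps.zip son.toList) 0) (l := sons) (acc := [])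
  rw [h]
  simp only [List.nil_append]
  apply List.map_congr_left
  intro son _
  rw [lcpLoop_eq]
  ring

-- B's final comprehension over zip(sons, lcps) is a filter of sons
lemma zip_filter_map (f : String → Int) (q : Int → Bool) (sons : List String) :
    (((sons.zip (sons.map f)).filter (fun p => q p.2)).map Prod.fst)
    = sons.filter (fun s => q (f s)) := by
  induction sons with
  | nil => rfl
  | cons s ss ih =>
    simp only [List.map_cons, List.zip_cons_cons, List.filter_cons]
    by_cases h : q (f s) <;> simp [h, ih]

lemma check_eq_check_alt : ∀ (parent : String) (sons : List String), check parent sons = check_alt parent sons := by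
  intro parent sons
  set ps := parent.toList with hps
  set P := ps.length with hP
  rw [check, check_alt, PySem.Str.len_eq, ← hps, ← hP]
  by_cases h0 : P = 0
  · rw [h0]
    simp only [Nat.cast_zero]
    rw [if_pos trivial, PySem.List.pyRange_one_eq_nil (le_refl 0)]
    rfl
  · rw [if_neg (by exact_mod_cast h0)]
    simp only []
    rw [PySem.List.pyRange_zero_natCast, List.range_eq_range']
    rw [show (fun k : Nat => (k:Int)) = Int.ofNat from rfl]
    rw [lcps_fold_eq ps sons]
    have hc0 : (sons.length : Int) = (cntF ps sons 0 : Int) := by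
      rw [cntF]
      congr 1
      symm
      apply List.length_filter_eq_length_iff.mpr
      intro a _
      simp [matchGe]
    rw [hc0, tLoop_eq ps sons (by omega) P 0 0 (by omega) (fun hn => absurd hn h0)]
    rw [zip_filter_map (fun son => (lcpN ps son.toList : Int)) (fun l => decide (Int.ofNat (tF (cntF ps sons) (List.range' 0 P) 0) ≤ l)) sons]
    have hA : sons = sons.filter (matchGe ps 0) := by
      symm; rw [List.filter_eq_self]; intro a _; simp [matchGe]
    conv_lhs => rw [hA]
    rw [checkLoop_eq ps sons P 0 0 (by omega) (le_refl 0)]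
    apply List.filter_congr
    intro son _
    simp only [matchGe, Int.ofNat_eq_natCast]
    by_cases h : tF (cntF ps sons) (List.range' 0 P) 0 ≤ lcpN ps son.toList
    · rw [decide_eq_true h, decide_eq_true (by exact_mod_cast h)]
    · rw [decide_eq_false h, decide_eq_false (by exact_mod_cast h)]

-- ===== VERDICT (by name: the statement is the Claim_ definition above) =====
theorem check_spec : Claim_equal_check := by
  intro parent sons _
  exact check_eq_check_alt parent sons
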